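-- pv_equiv track=rewrite | github.com/marcwie/advent-of-code | day4.py | play_one_board
-- ===== SOURCE A (Python) =====
-- def play_one_board(board, numbers):
--
--     flat_board = [n for row in board for n in row]
--     mask = [False] * len(flat_board)
--
--     score = sum(flat_board)
--     for count, number in enumerate(numbers):
--
--         if number in flat_board:
--             mask[flat_board.index(number)] = True
--             score -= number
--
--         for i in range(len(board)):
--             if False not in mask[i::5] or False not in mask[5*i:5*(i+1)]:
--                 return score * number, count
-- ===== SOURCE B (Python) =====
-- def play_one_board(board, numbers):
--     flat = [n for row in board for n in row]
--     F = len(flat)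
--     members = set(flat)
--     first_index = {}
--     for i, v in enumerate(flat):
--         if v not in first_index:
--             first_index[v] = i
--     idxs = list(range(F))
--     lines = []
--     for i in range(len(board)):
--         lines.append(idxs[i::5])
--         lines.append(idxs[5 * i:5 * (i + 1)])
--     idx_to_lines = {}
--     for ln, line in enumerate(lines):
--         for j in line:
--             idx_to_lines.setdefault(j, []).append(ln)
--     remaining = [len(line) for line in lines]
--     marked = set()
--     score = sum(flat)
--     for count, number in enumerate(numbers):
--         if number in members:
--             score -= number
--         if number in first_index and number not in marked:
--             marked.add(number)
--             for ln in idx_to_lines.get(first_index[number], []):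
--                 remaining[ln] -= 1
--         if 0 in remaining:
--             return score * number, count
--     return None
-- ===== Notes on version B (the rewrite author's own statement) =====
-- stated objective: faster
-- what changed: Replaces per-number list scans (membership scan, list.index, and re-slicing the mask into rows/columns every round) by precomputed structures: a value set, a first-index dict, the line index-sets with an index-to-lines incidence map, and per-line unmarked counters that are decremented on marking, so each round only does O(1) lookups plus a counter scan instead of rebuilding and scanning slices of the whole board.
import Mathlib
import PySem

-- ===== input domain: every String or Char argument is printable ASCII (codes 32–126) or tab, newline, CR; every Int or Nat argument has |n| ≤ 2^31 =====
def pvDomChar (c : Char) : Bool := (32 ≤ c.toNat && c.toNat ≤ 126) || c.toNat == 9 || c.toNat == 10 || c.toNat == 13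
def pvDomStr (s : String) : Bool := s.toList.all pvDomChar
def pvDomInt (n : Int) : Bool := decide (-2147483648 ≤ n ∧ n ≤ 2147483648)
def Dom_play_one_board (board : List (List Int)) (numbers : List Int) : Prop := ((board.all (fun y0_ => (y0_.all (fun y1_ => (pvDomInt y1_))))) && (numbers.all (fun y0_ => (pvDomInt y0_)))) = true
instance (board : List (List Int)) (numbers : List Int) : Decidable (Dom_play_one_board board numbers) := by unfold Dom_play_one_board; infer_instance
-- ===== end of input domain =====

-- B replaces A's per-number scans (membership scan, list.index, re-slicing the mask) by precomputed
-- first-index dict / value set / line index-sets with incidence map and per-line unmarked counters (objective: faster).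

-- ===== PORT A =====
-- the inner 'for i in range(len(board)): if False not in mask[i::5] or False not in mask[5*i:5*(i+1)]: return …':
-- the returned value does not depend on i, so the early return is ported as an 'any' over range(len(board))
def pvWinA (mask : List Bool) (R : Nat) : Bool :=
  (List.range R).any (fun i =>
    !(((PySem.List.slice? mask (some (i : Int)) none 5).getD []).contains false) ||
    !((PySem.List.slice mask (some (Int.ofNat (5 * i))) (some (Int.ofNat (5 * (i + 1))))).contains false))

-- the 'for count, number in enumerate(numbers)' loop with early return; mask[flat.index(number)] = True is
-- List.set at the index? value (inside the branch the membership test guarantees index? is some)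
def pvGoA (R : Nat) (flat : List Int) : List Int → Int → List Bool → Int → Option (Int × Int)
  | [], _, _, _ => none
  | number :: rest, count, mask, score =>
    let st :=
      if flat.contains number then
        (mask.set ((PySem.List.index? flat number).getD 0) true, score - number)
      else (mask, score)
    if pvWinA st.1 R then some (st.2 * number, count)
    else pvGoA R flat rest (count + 1) st.1 st.2

def play_one_board (board : List (List Int)) (numbers : List Int) : Option (Int × Int) :=
  let flat := board.flatMap id
  pvGoA board.length flat numbers 0 (List.replicate flat.length false) flat.sum

-- ===== PORT B =====
-- first_index: dict value -> first flat index
def pvFirst (flat : List Int) : PySem.Dict Int Int :=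
  (PySem.List.enumerate flat 0).foldl
    (fun d p => if (d.get? p.2).isSome then d else d.insert p.2 p.1) PySem.Dict.empty

-- lines: for each i, the column index-set idxs[i::5] and the row index-set idxs[5i:5(i+1)]
def pvLines (F R : Nat) : List (List Int) :=
  let idxs := PySem.List.pyRange 0 F 1
  (List.range R).foldl
    (fun acc (i : Nat) => acc ++
      [(PySem.List.slice? idxs (some (i : Int)) none 5).getD [],
       PySem.List.slice idxs (some (Int.ofNat (5 * i))) (some (Int.ofNat (5 * (i + 1))))]) []

-- idx_to_lines: flat index -> list of line numbers containing it (setdefault+append)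
def pvI2L (lines : List (List Int)) : PySem.Dict Int (List Int) :=
  (PySem.List.enumerate lines 0).foldl
    (fun d p => p.2.foldl (fun d j => d.insert j (d.getD j [] ++ [p.1])) d) PySem.Dict.empty

def pvGoB (members : PySem.Set Int) (first : PySem.Dict Int Int) (i2l : PySem.Dict Int (List Int)) :
    List Int → Int → List Int → PySem.Set Int → Int → Option (Int × Int)
  | [], _, _, _, _ => none
  | number :: rest, count, remaining, marked, score =>
    let score := if members.contains number then score - number else score
    let st :=
      if (first.get? number).isSome && !(marked.contains number) then
        ((i2l.getD ((first.get? number).getD 0) []).foldl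
           (fun r ln => PySem.List.pySetD r ln (PySem.List.pyGetD r ln 0 - 1)) remaining,
         PySem.Set.add marked number)
      else (remaining, marked)
    if st.1.contains 0 then some (score * number, count)
    else pvGoB members first i2l rest (count + 1) st.1 st.2 score

def play_one_board_alt (board : List (List Int)) (numbers : List Int) : Option (Int × Int) :=
  let flat := board.flatMap id
  let members := PySem.Set.ofList flat
  let first := pvFirst flat
  let lines := pvLines flat.length board.length
  let i2l := pvI2L lines
  pvGoB members first i2l numbers 0 (lines.map (fun L => (L.length : Int))) PySem.Set.empty flat.sum

-- ===== PRECONDITION & SPEC =====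
def Spec_play_one_board (board : List (List Int)) (numbers : List Int) (out : Option (Int × Int)) : Prop := out = play_one_board_alt board numbers
instance (board : List (List Int)) (numbers : List Int) (out : Option (Int × Int)) : Decidable (Spec_play_one_board board numbers out) := by unfold Spec_play_one_board; infer_instance

-- ===== CLAIM (what is proved, stated in full; the proofs are below) =====
def Claim_equal_play_one_board : Prop := ∀ (board : List (List Int)) (numbers : List Int), Dom_play_one_board board numbers → Spec_play_one_board board numbers (play_one_board board numbers)

-- ===== LEMMAS AND PROOFS =====

-- the abstract state: which flat position is marked, given the set of marked values
def pvMaskFn (flat marked : List Int) : Int → Bool :=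
  fun j => marked.any (fun v => PySem.List.index? flat v == some j.toNat)

def pvMask (flat marked : List Int) : List Bool :=
  (PySem.List.pyRange 0 flat.length 1).map (pvMaskFn flat marked)

def pvRem (flat : List Int) (R : Nat) (marked : List Int) : List Int :=
  (pvLines flat.length R).map (fun L => ((L.countP (fun j => !pvMaskFn flat marked j)) : Int))

theorem pv_not_contains_false {α : Type} (L : List α) (g : α → Bool) :
    (!((L.map g).contains false)) = L.all g := by
  induction L with
  | nil => simp
  | cons x L ih => cases hx : g x <;> simp [hx, ← ih]

theorem pv_count_le (L : List Int) (g : Int → Bool) (k : Int) (hk : g k = false) :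
    L.count k ≤ L.countP (fun j => !g j) := by
  rw [List.count_eq_countP]
  apply List.countP_mono_left
  intro a _ ha
  simp at ha; subst ha; simp [hk]

theorem pv_cntP_update (L : List Int) (g : Int → Bool) (k : Int) (hk : g k = false) :
    L.countP (fun j => !g j && !(j == k)) = L.countP (fun j => !g j) - L.count k := by
  induction L with
  | nil => simp
  | cons x L ih =>
    by_cases hx : x = k
    · subst hx
      have hle := pv_count_le L g x hk
      simp [List.countP_cons, hk, ih]
    · have hle := pv_count_le L g k hk
      simp [List.countP_cons, hx, ih]
      cases hgx : g x <;> simp [hgx] <;> omega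

theorem pv_maskFn_append (flat marked : List Int) (number : Int) (j : Int) :
    pvMaskFn flat (marked ++ [number]) j =
      (pvMaskFn flat marked j || (PySem.List.index? flat number == some j.toNat)) := by
  simp [pvMaskFn]

theorem pv_maskFn_false_at (flat marked : List Int) (number : Int) (k : Nat)
    (hk : PySem.List.index? flat number = some k) (hnm : number ∉ marked) :
    pvMaskFn flat marked ((k : Nat) : Int) = false := by
  simp only [pvMaskFn, Int.toNat_natCast]
  rw [List.any_eq_false]
  intro v hv
  simp only [beq_iff_eq]
  intro hvk
  obtain ⟨h1, h2, _⟩ := PySem.List.getElem_of_index?_eq_some hvk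
  obtain ⟨h1', h2', _⟩ := PySem.List.getElem_of_index?_eq_some hk
  exact hnm (by rwa [h2.symm.trans h2'] at hv)

theorem pv_mask_set_new (flat marked : List Int) (number : Int) (k : Nat)
    (hk : PySem.List.index? flat number = some k) :
    (pvMask flat marked).set k true = pvMask flat (marked ++ [number]) := by
  obtain ⟨hlt, hval, _⟩ := PySem.List.getElem_of_index?_eq_some hk
  apply List.ext_getElem
  · simp [pvMask]
  · intro m hm hm'
    simp only [pvMask, PySem.List.pyRange_one] at *
    simp only [List.length_set, List.length_map, List.length_range] at hm
    rw [List.getElem_set]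
    simp only [List.getElem_map, List.getElem_range]
    rw [pv_maskFn_append, hk]
    split
    · next h => subst h; simp
    · next h =>
      simp only [Int.zero_add] at *
      have : ¬ ((k : Nat) = ((m : Int)).toNat) := by omega
      simp [pvMaskFn]
      omega

theorem pv_mask_set_repeat (flat marked : List Int) (number : Int) (k : Nat)
    (hk : PySem.List.index? flat number = some k) (hm : number ∈ marked) :
    (pvMask flat marked).set k true = pvMask flat marked := by
  apply List.ext_getElem
  · simp
  · intro m hm1 hm2
    rw [List.getElem_set]
    split
    · next h =>
      subst h
      simp only [pvMask, PySem.List.pyRange_one, List.getElem_map, List.getElem_range]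
      symm
      simp only [pvMaskFn, List.any_eq_true]
      exact ⟨number, hm, by rw [hk]; simp⟩
    · rfl
theorem pv_first_aux (xs : List Int) : ∀ (s : Int) (d : PySem.Dict Int Int) (v : Int),
    ((PySem.List.enumerate xs s).foldl
      (fun d p => if (d.get? p.2).isSome then d else d.insert p.2 p.1) d).get? v =
      ((d.get? v).or ((PySem.List.index? xs v).map (fun n => (n : Int) + s))) := by
  induction xs with
  | nil => intro s d v; simp [PySem.List.enumerate]
  | cons x xs ih =>
    intro s d v
    rw [show PySem.List.enumerate (x :: xs) s = (s, x) :: PySem.List.enumerate xs (s + 1) from rfl]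
    rw [List.foldl_cons, ih]
    by_cases hvx : v = x
    · subst hvx
      cases hd : d.get? v with
      | some a => simp [hd, PySem.List.index?_cons_self]
      | none =>
        simp only [hd, Option.isSome_none]
        simp only [Bool.false_eq_true, if_false]
        rw [PySem.Dict.get?_insert_self, PySem.List.index?_cons_self]
        simp
    · have h1 : PySem.List.index? (x :: xs) v = (PySem.List.index? xs v).map (· + 1) :=
        PySem.List.index?_cons_of_ne xs (fun h => hvx h.symm)
      rw [h1]
      have h2 : ∀ (d' : PySem.Dict Int Int) (i : Int), ((if (d'.get? x).isSome then d' else d'.insert x i) : PySem.Dict Int Int).get? v = d'.get? v := by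
        intro d' i
        split
        · rfl
        · exact PySem.Dict.get?_insert_of_ne _ _ hvx
      rw [h2]
      cases PySem.List.index? xs v with
      | none => simp
      | some a =>
        simp only [Option.map_some]
        have : (a : Int) + (s + 1) = (a : Int) + 1 + s := by ring
        simp [this]

theorem pv_first_get? (flat : List Int) (v : Int) :
    (pvFirst flat).get? v = (PySem.List.index? flat v).map (fun n => (n : Int)) := by
  rw [pvFirst, pv_first_aux]
  have : (PySem.Dict.empty : PySem.Dict Int Int).get? v = none := by rfl
  rw [this]
  cases PySem.List.index? flat v <;> simp
theorem pv_slice?_map {α β : Type} (xs : List α) (f : α → β) (a b : Option Int) (st : Int) :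
    PySem.List.slice? (xs.map f) a b st = (PySem.List.slice? xs a b st).map (List.map f) := by
  unfold PySem.List.slice?
  rw [List.length_map]
  split
  · rfl
  · simp only [Option.map_some]
    congr 1
    rw [List.map_filterMap]
    apply List.filterMap_congr
    intro k _
    rw [List.getElem?_map]

theorem pv_slice_map {α β : Type} (xs : List α) (f : α → β) (a b : Int) :
    PySem.List.slice (xs.map f) (some a) (some b) = (PySem.List.slice xs (some a) (some b)).map f := by
  unfold PySem.List.slice
  rw [List.length_map, List.map_take, List.map_drop]

theorem pv_mem_slice? {α : Type} (xs : List α) (a b : Option Int) (st : Int) {x : α}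
    (hx : x ∈ (PySem.List.slice? xs a b st).getD []) : x ∈ xs := by
  unfold PySem.List.slice? at hx
  split at hx
  · simp at hx
  · simp only [Option.getD_some, List.mem_filterMap] at hx
    obtain ⟨k, _, hk⟩ := hx
    exact List.mem_of_getElem? hk
theorem pv_lines_eq (F R : Nat) :
    pvLines F R = (List.range R).flatMap (fun (i : Nat) =>
      [(PySem.List.slice? (PySem.List.pyRange 0 F 1) (some (i : Int)) none 5).getD [],
       PySem.List.slice (PySem.List.pyRange 0 F 1) (some (Int.ofNat (5 * i))) (some (Int.ofNat (5 * (i + 1))))]) := by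
  unfold pvLines
  rw [PySem.List.foldl_append_eq_flatMap]
  simp

theorem pv_line_nonneg (F R : Nat) {L : List Int} (hL : L ∈ pvLines F R) {j : Int} (hj : j ∈ L) : 0 ≤ j := by
  rw [pv_lines_eq] at hL
  simp only [List.mem_flatMap, List.mem_range] at hL
  obtain ⟨i, _, hi⟩ := hL
  have hjr : j ∈ PySem.List.pyRange 0 F 1 := by
    simp only [List.mem_cons, List.mem_singleton] at hi
    rcases hi with h | h | h
    · exact pv_mem_slice? _ _ _ _ (h ▸ hj)
    · exact PySem.List.mem_of_mem_slice _ _ _ (h ▸ hj)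
    · simp at h
  exact (PySem.List.mem_pyRange_one.1 hjr).1
theorem pv_i2l_inner (L : List Int) : ∀ (d : PySem.Dict Int (List Int)) (ln x : Int),
    (L.foldl (fun d j => d.insert j (d.getD j [] ++ [ln])) d).getD x [] =
      d.getD x [] ++ List.replicate (L.count x) ln := by
  induction L with
  | nil => intro d ln x; simp
  | cons j L ih =>
    intro d ln x
    rw [List.foldl_cons, ih, List.count_cons]
    by_cases hx : x = j
    · subst hx
      rw [PySem.Dict.getD_insert]
      simp [List.replicate_succ]
    · rw [PySem.Dict.getD_insert]
      simp [hx]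
      omega

theorem pv_i2l_aux (lines : List (List Int)) : ∀ (s : Int) (d : PySem.Dict Int (List Int)) (x : Int),
    ((PySem.List.enumerate lines s).foldl
      (fun d p => p.2.foldl (fun d j => d.insert j (d.getD j [] ++ [p.1])) d) d).getD x [] =
      d.getD x [] ++ (PySem.List.enumerate lines s).flatMap (fun p => List.replicate (p.2.count x) p.1) := by
  induction lines with
  | nil => intro s d x; simp [PySem.List.enumerate]
  | cons L lines ih =>
    intro s d x
    rw [show PySem.List.enumerate (L :: lines) s = (s, L) :: PySem.List.enumerate lines (s + 1) from rfl]
    rw [List.foldl_cons, ih, pv_i2l_inner]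
    simp [List.append_assoc]

theorem pv_i2l_getD (lines : List (List Int)) (x : Int) :
    (pvI2L lines).getD x [] =
      (PySem.List.enumerate lines 0).flatMap (fun p => List.replicate (p.2.count x) p.1) := by
  rw [pvI2L, pv_i2l_aux]
  have : (PySem.Dict.empty : PySem.Dict Int (List Int)).getD x [] = [] := by rfl
  rw [this, List.nil_append]

theorem pv_i2l_mem_bound (lines : List (List Int)) (x q : Int)
    (hq : q ∈ (pvI2L lines).getD x []) : 0 ≤ q ∧ q < (lines.length : Int) := by
  rw [pv_i2l_getD] at hq
  simp only [List.mem_flatMap, List.mem_replicate] at hq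
  obtain ⟨p, hp, _, hqp⟩ := hq
  subst hqp
  have : p.1 ∈ (PySem.List.enumerate lines 0).map (·.1) := List.mem_map_of_mem hp
  rw [PySem.List.map_fst_enumerate] at this
  have := PySem.List.mem_pyRange_one.1 this
  omega

theorem pv_count_flatMap_aux (x : Int) : ∀ (lines : List (List Int)) (s q : Int), q < s →
    ((PySem.List.enumerate lines s).flatMap (fun p => List.replicate (p.2.count x) p.1)).count q = 0 := by
  intro lines
  induction lines with
  | nil => intro s q _; simp [PySem.List.enumerate]
  | cons L lines ih =>
    intro s q hq
    rw [show PySem.List.enumerate (L :: lines) s = (s, L) :: PySem.List.enumerate lines (s + 1) from rfl]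
    simp only [List.flatMap_cons, List.count_append]
    rw [ih (s+1) q (by omega), List.count_replicate]
    simp [show ¬ (s = q) from by omega]

theorem pv_i2l_count_aux (x : Int) : ∀ (lines : List (List Int)) (s : Int) (m : Nat) (hm : m < lines.length),
    ((PySem.List.enumerate lines s).flatMap (fun p => List.replicate (p.2.count x) p.1)).count (s + m) =
      lines[m].count x := by
  intro lines
  induction lines with
  | nil => intro s m hm; simp at hm
  | cons L lines ih =>
    intro s m hm
    rw [show PySem.List.enumerate (L :: lines) s = (s, L) :: PySem.List.enumerate lines (s + 1) from rfl]
    simp only [List.flatMap_cons, List.count_append, List.count_replicate]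
    cases m with
    | zero =>
      rw [pv_count_flatMap_aux x lines (s+1) (s + ((0:Nat):Int)) (by push_cast; omega)]
      simp
    | succ m =>
      have h1 : s + (m.succ : Int) = (s + 1) + m := by push_cast; ring
      rw [h1, ih (s+1) m (by simpa using hm)]
      have : ¬ ((s : Int) = s + 1 + m) := by omega
      simp [this]

theorem pv_i2l_count (lines : List (List Int)) (x : Int) (m : Nat) (hm : m < lines.length) :
    ((pvI2L lines).getD x []).count (m : Int) = lines[m].count x := by
  rw [pv_i2l_getD]
  have := pv_i2l_count_aux x lines 0 m hm
  simpa using this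
theorem pv_dec_fold (ls : List Int) : ∀ (r : List Int), (∀ x ∈ ls, 0 ≤ x ∧ x < (r.length : Int)) →
    ∀ m : Nat,
      (ls.foldl (fun r ln => PySem.List.pySetD r ln (PySem.List.pyGetD r ln 0 - 1)) r)[m]? =
        r[m]?.map (fun a => a - (ls.count (m : Int) : Int)) := by
  induction ls with
  | nil => intro r _ m; simp
  | cons ln ls ih =>
    intro r h m
    obtain ⟨h0, h1⟩ := h ln (by simp)
    rw [List.foldl_cons]
    rw [PySem.List.pySetD_of_nonneg r _ h0, PySem.List.pyGetD_eq_getElem r 0 h0 h1]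
    have hlen : (r.set ln.toNat (r[ln.toNat]'(by omega) - 1)).length = r.length := by simp
    rw [ih _ (by intro x hx; rw [hlen]; exact h x (by simp [hx]))]
    rw [List.getElem?_set]
    rw [List.count_cons]
    by_cases hm : ln.toNat = m
    · have hln : ln = (m : Int) := by omega
      subst hln
      simp only [Int.toNat_natCast] at *
      have hmlt : m < r.length := by omega
      rw [if_pos trivial, if_pos hmlt, List.getElem?_eq_getElem hmlt]
      simp only [BEq.rfl, if_true, Option.map_some]
      congr 1
      push_cast
      ring
    · rw [if_neg hm]
      have hne : ln ≠ (m : Int) := by omega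
      have hb : ((ln == (m : Int))) = false := beq_eq_false_iff_ne.mpr hne
      rw [hb]
      simp

theorem pv_contains_map {α β : Type} [BEq β] (l : List α) (f : α → β) (y : β) :
    ((l.map f).contains y) = l.any (fun x => y == f x) := by
  induction l with
  | nil => simp
  | cons x l ih => simp [List.contains_cons, ih]

theorem pv_any_flatMap {α β : Type} (l : List α) (f : α → List β) (p : β → Bool) :
    ((l.flatMap f).any p) = l.any (fun x => (f x).any p) := by
  induction l with
  | nil => simp
  | cons x l ih => simp [List.flatMap_cons, List.any_append, ih]

theorem pv_all_eq_cntP (L : List Int) (g : Int → Bool) :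
    ((0 : Int) == ((L.countP (fun j => !g j) : Nat) : Int)) = L.all g := by
  rw [Bool.eq_iff_iff]
  simp only [beq_iff_eq, List.all_eq_true]
  rw [eq_comm, Int.natCast_eq_zero, List.countP_eq_zero]
  simp

theorem pv_getD_map_map {α β : Type} (o : Option (List α)) (g : α → β) :
    ((o.map (List.map g)).getD []) = (o.getD []).map g := by
  cases o <;> rfl

-- remaining update lemma
theorem pv_rem_update (flat : List Int) (R : Nat) (marked : List Int) (number : Int) (k : Nat)
    (hk : PySem.List.index? flat number = some k) (hnm : number ∉ marked) :
    ((pvI2L (pvLines flat.length R)).getD ((k : Nat) : Int) []).foldl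
        (fun r ln => PySem.List.pySetD r ln (PySem.List.pyGetD r ln 0 - 1)) (pvRem flat R marked) =
      pvRem flat R (marked ++ [number]) := by
  set lines := pvLines flat.length R with hlines
  set ls := (pvI2L lines).getD ((k : Nat) : Int) [] with hls
  have hrlen : (pvRem flat R marked).length = lines.length := by simp [pvRem, hlines]
  have hbound : ∀ x ∈ ls, 0 ≤ x ∧ x < ((pvRem flat R marked).length : Int) := by
    intro x hx
    rw [hrlen]
    exact pv_i2l_mem_bound lines _ x hx
  apply List.ext_getElem?
  intro m
  rw [pv_dec_fold ls (pvRem flat R marked) hbound m]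
  by_cases hm : m < lines.length
  · rw [pv_i2l_count lines _ m hm]
    have h1 : (pvRem flat R marked)[m]? = some ((lines[m].countP (fun j => !pvMaskFn flat marked j) : Int)) := by
      simp only [pvRem, ← hlines, List.getElem?_map, List.getElem?_eq_getElem hm, Option.map_some]
    have h2 : (pvRem flat R (marked ++ [number]))[m]? = some ((lines[m].countP (fun j => !pvMaskFn flat (marked ++ [number]) j) : Int)) := by
      simp only [pvRem, ← hlines, List.getElem?_map, List.getElem?_eq_getElem hm, Option.map_some]
    rw [h1, h2, Option.map_some]
    congr 1
    have hmem : lines[m] ∈ lines := List.getElem_mem hm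
    have hcongr : lines[m].countP (fun j => !pvMaskFn flat (marked ++ [number]) j)
        = lines[m].countP (fun j => !pvMaskFn flat marked j && !(j == ((k : Nat) : Int))) := by
      apply List.countP_congr
      intro j hj
      have hj0 : 0 ≤ j := pv_line_nonneg flat.length R hmem hj
      rw [pv_maskFn_append, hk]
      have : (some k == some j.toNat) = (j == ((k : Nat) : Int)) := by
        rw [Bool.eq_iff_iff]
        simp only [beq_iff_eq, Option.some.injEq]
        omega
      rw [this, Bool.not_or]
    rw [hcongr]
    rw [pv_cntP_update lines[m] (pvMaskFn flat marked) ((k : Nat) : Int)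
      (pv_maskFn_false_at flat marked number k hk hnm)]
    have hle := pv_count_le lines[m] (pvMaskFn flat marked) ((k : Nat) : Int)
      (pv_maskFn_false_at flat marked number k hk hnm)
    push_cast [Nat.cast_sub hle]
    ring
  · have h1 : (pvRem flat R marked)[m]? = none := by
      rw [List.getElem?_eq_none_iff]; omega
    have h2 : (pvRem flat R (marked ++ [number]))[m]? = none := by
      rw [List.getElem?_eq_none_iff]; rw [show (pvRem flat R (marked ++ [number])).length = lines.length from by simp [pvRem, ← hlines]]; omega
    rw [h1, h2, Option.map_none]

-- win condition equivalence
theorem pv_win_eq (flat : List Int) (R : Nat) (marked : List Int) :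
    pvWinA (pvMask flat marked) R = (pvRem flat R marked).contains 0 := by
  rw [pvWinA, pvRem, pv_lines_eq, pv_contains_map, pv_any_flatMap]
  apply List.any_congr rfl
  intro i
  simp only [List.any_cons, List.any_nil, Bool.or_false]
  congr 1
  · rw [pvMask, pv_slice?_map, pv_getD_map_map, pv_not_contains_false, pv_all_eq_cntP]
  · rw [pvMask, pv_slice_map, pv_not_contains_false, pv_all_eq_cntP]

-- initial states
theorem pv_mask_nil (flat : List Int) : pvMask flat [] = List.replicate flat.length false := by
  have : ∀ j, pvMaskFn flat [] j = false := by intro j; rfl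
  rw [pvMask]
  rw [List.eq_replicate_iff]
  constructor
  · simp [PySem.List.length_pyRange_one]
  · intro b hb
    simp only [List.mem_map] at hb
    obtain ⟨j, _, hj⟩ := hb
    rw [← hj, this]

theorem pv_rem_nil (flat : List Int) (R : Nat) :
    pvRem flat R [] = (pvLines flat.length R).map (fun L => (L.length : Int)) := by
  rw [pvRem]
  apply List.map_congr_left
  intro L _
  have : ∀ j, pvMaskFn flat [] j = false := by intro j; rfl
  simp [this]

-- the main loop equivalence
theorem pv_go_eq (flat : List Int) (R : Nat) (numbers : List Int) :
    ∀ (count : Int) (marked : List Int) (score : Int), (∀ v ∈ marked, v ∈ flat) →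
      pvGoA R flat numbers count (pvMask flat marked) score =
        pvGoB (PySem.Set.ofList flat) (pvFirst flat) (pvI2L (pvLines flat.length R)) numbers count
          (pvRem flat R marked) marked score := by
  induction numbers with
  | nil => intro count marked score hm; rfl
  | cons number rest ih =>
    intro count marked score hm
    by_cases hmem : number ∈ flat
    · obtain ⟨k, hk⟩ := Option.isSome_iff_exists.mp ((PySem.List.index?_isSome_iff flat number).mpr hmem)
      have hcont : flat.contains number = true := by simpa using hmem
      have hcontS : PySem.Set.contains (PySem.Set.ofList flat) number = true := by
        simpa [PySem.Set.contains] using (PySem.Set.mem_ofList flat number).mpr hmem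
      have hfirst : (pvFirst flat).get? number = some ((k : Int)) := by
        rw [pv_first_get?, hk]; rfl
      by_cases hmk : number ∈ marked
      · have hcm : PySem.Set.contains marked number = true := by
          simpa [PySem.Set.contains] using hmk
        simp only [pvGoA, pvGoB, hcont, hcontS, hfirst, hcm, hk, if_true, Option.getD_some,
          Option.isSome_some, Bool.not_true, Bool.and_false, Bool.false_eq_true, if_false]
        rw [pv_mask_set_repeat flat marked number k hk hmk, pv_win_eq]
        split
        · rfl
        · exact ih (count + 1) marked (score - number) hm
      · have hcm : PySem.Set.contains marked number = false := by
          simp only [PySem.Set.contains, List.contains_eq_mem, decide_eq_false_iff_not]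
          exact hmk
        have hadd : PySem.Set.add marked number = marked ++ [number] := by
          simp [PySem.Set.add, PySem.Set.contains, hmk]
        simp only [pvGoA, pvGoB, hcont, hcontS, hfirst, hcm, hk, if_true, Option.getD_some,
          Option.isSome_some, Bool.not_false, Bool.and_true, if_true, hadd]
        rw [pv_mask_set_new flat marked number k hk,
          pv_rem_update flat R marked number k hk hmk, pv_win_eq]
        split
        · rfl
        · exact ih (count + 1) (marked ++ [number]) (score - number)
            (by intro v hv; rcases List.mem_append.mp hv with h | h
                · exact hm v h
                · simpa using (by simpa using h : v = number) ▸ hmem)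
    · have hcont : flat.contains number = false := by
        simp; simpa using hmem
      have hcontS : PySem.Set.contains (PySem.Set.ofList flat) number = false := by
        simp [PySem.Set.contains]
        intro h
        exact absurd ((PySem.Set.mem_ofList flat number).mp (by simpa using h)) hmem
      have hfirst : (pvFirst flat).get? number = none := by
        rw [pv_first_get?, (PySem.List.index?_eq_none_iff flat number).mpr hmem]; rfl
      simp only [pvGoA, pvGoB, hcont, hcontS, hfirst, Bool.false_eq_true, if_false,
        Option.isSome_none, Bool.false_and]
      rw [pv_win_eq]
      split
      · rfl
      · exact ih (count + 1) marked score hm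

-- ===== VERDICT (by name: the statement is the Claim_ definition above) =====
theorem play_one_board_spec : Claim_equal_play_one_board := by
  intro board numbers _
  unfold Spec_play_one_board play_one_board play_one_board_alt
  have h := pv_go_eq (board.flatMap id) board.length numbers 0 [] (board.flatMap id).sum
    (by intro v hv; simp at hv)
  rw [pv_mask_nil] at h
  rw [pv_rem_nil] at h
  simpa [PySem.Set.empty] using h
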